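-- pv_equiv track=rewrite | github.com/yang13839520007-lang/quant_system | core/intraday_recheck_manager.py | _merge_positional_args
-- ===== SOURCE A (Python) =====
-- from typing import Any
--
-- def _merge_positional_args(args: tuple[Any, ...], kwargs: dict[str, Any]) -> dict[str, Any]:
--     merged = dict(kwargs)
--     positional_names = [
--         "trading_date",
--         "open_execution_decision_path",
--         "market_snapshot_path",
--         "output_dir",
--         "base_dir",
--     ]
--     for idx, value in enumerate(args):
--         if idx < len(positional_names) and positional_names[idx] not in merged:
--             merged[positional_names[idx]] = value
--     return merged
-- ===== SOURCE B (Python) =====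
-- from typing import Any
--
-- _POSITIONAL_NAMES = [
--     "trading_date",
--     "open_execution_decision_path",
--     "market_snapshot_path",
--     "output_dir",
--     "base_dir",
-- ]
--
-- def _fill(merged: dict, names: list, values: list) -> dict:
--     if not names or not values:
--         return merged
--     if names[0] not in merged:
--         merged = {**merged, names[0]: values[0]}
--     return _fill(merged, names[1:], values[1:])
--
-- def _merge_positional_args(args: tuple[Any, ...], kwargs: dict[str, Any]) -> dict[str, Any]:
--     return _fill(dict(kwargs), _POSITIONAL_NAMES, list(args))
-- ===== Notes on version B (the rewrite author's own statement) =====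
-- stated objective: alternative
-- what changed: Replaces A's indexed loop over enumerate(args) with a guarded lookup positional_names[idx] by a recursive helper that consumes the name list and the argument list as parallel lists, rebuilding the dict by spread on each missing name; no enumerate, no index arithmetic, no bound check (truncation falls out of the base case).
import Mathlib
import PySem

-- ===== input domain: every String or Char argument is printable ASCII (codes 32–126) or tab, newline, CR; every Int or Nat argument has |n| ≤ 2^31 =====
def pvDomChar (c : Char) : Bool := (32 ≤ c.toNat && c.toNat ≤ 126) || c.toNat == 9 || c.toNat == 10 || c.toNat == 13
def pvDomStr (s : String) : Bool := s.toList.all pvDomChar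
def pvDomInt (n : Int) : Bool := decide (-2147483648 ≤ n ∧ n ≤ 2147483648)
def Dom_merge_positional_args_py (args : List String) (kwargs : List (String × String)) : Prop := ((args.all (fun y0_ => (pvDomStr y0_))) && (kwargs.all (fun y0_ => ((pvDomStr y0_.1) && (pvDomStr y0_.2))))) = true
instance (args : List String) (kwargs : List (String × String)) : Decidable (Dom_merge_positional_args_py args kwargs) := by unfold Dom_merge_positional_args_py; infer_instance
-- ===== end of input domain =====

-- B replaces A's indexed loop over enumerate(args) (with a bound check and a lookup
-- positional_names[idx]) by a recursive helper consuming the name list and the argument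
-- list as parallel lists; truncation falls out of the base case (alternative decomposition).

-- ===== PORT A =====
def pvNames : List String :=
  ["trading_date", "open_execution_decision_path", "market_snapshot_path", "output_dir", "base_dir"]

-- loop body of A: if idx < len(positional_names) and positional_names[idx] not in merged: insert
def pvStep (merged : PySem.Dict String String) (p : Int × String) : PySem.Dict String String :=
  if p.1 < (pvNames.length : Int) ∧ merged.contains (PySem.List.pyGetD pvNames p.1 "") = false then
    merged.insert (PySem.List.pyGetD pvNames p.1 "") p.2
  else merged

def merge_positional_args_py (args : List String) (kwargs : List (String × String)) : List (String × String) :=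
  (List.foldl pvStep (PySem.Dict.ofList kwargs) (PySem.List.enumerate args)).items

-- ===== PORT B =====
-- Source B's _fill: recursion on (names, values); insert names[0] if missing, recurse on tails
def pvFill (merged : PySem.Dict String String) : List String → List String → PySem.Dict String String
  | [], _ => merged
  | _ :: _, [] => merged
  | n :: ns, v :: vs =>
      let m := if merged.contains n = false then merged.insert n v else merged
      pvFill m ns vs

def merge_positional_args_py_alt (args : List String) (kwargs : List (String × String)) : List (String × String) :=
  (pvFill (PySem.Dict.ofList kwargs) pvNames args).items

-- ===== PRECONDITION & SPEC =====
def Spec_merge_positional_args_py (args : List String) (kwargs : List (String × String)) (out : List (String × String)) : Prop := out = merge_positional_args_py_alt args kwargs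
instance (args : List String) (kwargs : List (String × String)) (out : List (String × String)) : Decidable (Spec_merge_positional_args_py args kwargs out) := by unfold Spec_merge_positional_args_py; infer_instance

-- ===== CLAIM (what is proved, stated in full; the proofs are below) =====
def Claim_equal_merge_positional_args_py : Prop := ∀ (args : List String) (kwargs : List (String × String)), Dom_merge_positional_args_py args kwargs → Spec_merge_positional_args_py args kwargs (merge_positional_args_py args kwargs)

-- ===== LEMMAS AND PROOFS =====

-- A's loop body once the index guard is settled: conditional insert keyed on membership.
def pvCondStep (d : PySem.Dict String String) (p : String × String) : PySem.Dict String String :=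
  if d.contains p.1 = false then d.insert p.1 p.2 else d

-- beyond index 4 A's guard is always false: the tail of the loop is the identity
lemma pv_fold_hi (xs : List String) (s : Int) (hs : 5 ≤ s) (d : PySem.Dict String String) :
    List.foldl pvStep d (PySem.List.enumerate xs s) = d := by
  induction xs generalizing s d with
  | nil => simp [PySem.List.enumerate_nil]
  | cons x xs ih =>
      rw [PySem.List.enumerate_cons, List.foldl_cons]
      have hx : pvStep d (s, x) = d := by
        unfold pvStep
        apply if_neg
        rintro ⟨h, -⟩
        simp [pvNames] at h
        omega
      rw [hx]
      exact ih (s + 1) (by omega) d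

-- A's index-driven loop is the name-driven conditional-insert fold over the zip
lemma pv_fold_enum (xs : List String) (s : Nat) (d : PySem.Dict String String) :
    List.foldl pvStep d (PySem.List.enumerate xs (s : Int))
      = List.foldl pvCondStep d ((pvNames.drop s).zip xs) := by
  induction xs generalizing s d with
  | nil => simp [PySem.List.enumerate_nil]
  | cons x xs ih =>
      by_cases hs : s < 5
      · have hlen : s < pvNames.length := by simpa [pvNames] using hs
        rw [PySem.List.enumerate_cons, List.foldl_cons,
            List.drop_eq_getElem_cons hlen, List.zip_cons_cons, List.foldl_cons]
        have hx : pvStep d ((s : Int), x) = pvCondStep d (pvNames[s], x) := by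
          have hget : PySem.List.pyGetD pvNames ((s : Int)) "" = pvNames[s] := by
            rw [PySem.List.pyGetD_eq_getElem pvNames "" (by omega) (by exact_mod_cast hlen)]
            simp
          have hcond : ((s : Int) < (pvNames.length : Int)) := by exact_mod_cast hlen
          unfold pvStep pvCondStep
          simp [hget, hcond]
        rw [hx, show ((s : Int) + 1) = ((s + 1 : Nat) : Int) by push_cast; ring]
        exact ih (s + 1) _
      · rw [PySem.List.enumerate_cons, List.foldl_cons]
        have hx : pvStep d ((s : Int), x) = d := by
          unfold pvStep
          apply if_neg
          rintro ⟨h, -⟩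
          simp [pvNames] at h
          omega
        rw [hx, show ((s : Int) + 1) = ((s + 1 : Nat) : Int) by push_cast; ring,
            pv_fold_hi xs (((s:Nat) + 1 : Nat) : Int) (by exact_mod_cast by omega : (5:Int) ≤ _) d]
        rw [List.drop_eq_nil_of_le (by simp [pvNames]; omega)]
        rfl

-- B's recursion on parallel lists is the conditional-insert fold over their zip
lemma pv_fill_eq_fold (ns vs : List String) (d : PySem.Dict String String) :
    pvFill d ns vs = List.foldl pvCondStep d (ns.zip vs) := by
  induction ns generalizing vs d with
  | nil => simp [pvFill]
  | cons n ns ih =>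
      cases vs with
      | nil => simp [pvFill]
      | cons v vs =>
          rw [List.zip_cons_cons, List.foldl_cons]
          show pvFill (if d.contains n = false then d.insert n v else d) ns vs = _
          rw [ih]
          rfl

-- ===== VERDICT (by name: the statement is the Claim_ definition above) =====
theorem merge_positional_args_py_spec : Claim_equal_merge_positional_args_py := by
  intro args kwargs _
  unfold Spec_merge_positional_args_py merge_positional_args_py merge_positional_args_py_alt
  have h0 : PySem.List.enumerate args = PySem.List.enumerate args ((0 : Nat) : Int) := rfl
  rw [h0, pv_fold_enum args 0, List.drop_zero, pv_fill_eq_fold]
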